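-- pv_equiv track=rewrite | github.com/Eyalcohenx/NLP-Course | ass4/eval_old.py | find_sub_list_inside
-- ===== SOURCE A (Python) =====
-- def find_sub_list_inside(sl, l):
--     found_start = False
--     start = None
--     end = None
--     start_ent = sl[0]
--     end_ent = sl[-1]
--     for i, word in enumerate(l):
--         if start_ent in word and not found_start:
--             start = i
--             found_start = True
--         if found_start and end_ent in word:
--             end = i
--     if start < end:
--         temp = start
--         start = end
--         end = temp
--     return start, end
-- ===== SOURCE B (Python) =====
-- def find_sub_list_inside(sl, l):
--     start_ent = sl[0]
--     end_ent = sl[-1]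
--     start = next((i for i, w in enumerate(l) if start_ent in w), None)
--     end = None
--     if start is not None:
--         for i in range(len(l) - 1, start - 1, -1):
--             if end_ent in l[i]:
--                 end = i
--                 break
--     if start < end:
--         start, end = end, start
--     return start, end
-- ===== Notes on version B (the rewrite author's own statement) =====
-- stated objective: alternative
-- what changed: Replaces A's single fused forward loop carrying (found_start, start, end) state by two independent early-exiting scans: a first-occurrence search for start, then a right-to-left scan with break for end.
import Mathlib
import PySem

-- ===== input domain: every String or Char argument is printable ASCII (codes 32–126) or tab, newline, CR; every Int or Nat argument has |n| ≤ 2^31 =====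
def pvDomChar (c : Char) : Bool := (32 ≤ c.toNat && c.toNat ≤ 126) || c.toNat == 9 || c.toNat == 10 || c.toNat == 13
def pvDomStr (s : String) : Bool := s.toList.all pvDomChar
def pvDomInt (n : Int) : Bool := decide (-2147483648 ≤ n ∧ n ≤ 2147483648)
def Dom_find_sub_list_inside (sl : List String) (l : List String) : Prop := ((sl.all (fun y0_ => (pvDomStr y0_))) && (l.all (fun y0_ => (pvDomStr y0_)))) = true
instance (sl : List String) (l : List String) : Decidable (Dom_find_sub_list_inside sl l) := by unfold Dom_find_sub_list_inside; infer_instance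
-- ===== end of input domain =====

-- B replaces A's single fused forward loop (state: found_start/start/end) by a first-occurrence
-- search for start plus a right-to-left early-exit scan for end (objective: alternative).

-- ===== PORT A =====
-- A's 'for i, word in enumerate(l)' loop, carrying (found_start, start, end).
def fsli_loop (se ee : String) : Nat → List String → Bool × Option Int × Option Int → Bool × Option Int × Option Int
  | _, [], st => st
  | i, w :: ws, (found, start, end_) =>
      let p := PySem.Str.isIn se w && !found
      let found1 := if p then true else found
      let start1 := if p then some (i : Int) else start
      let end1 := if found1 && PySem.Str.isIn ee w then some (i : Int) else end_
      fsli_loop se ee (i + 1) ws (found1, start1, end1)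

def find_sub_list_inside (sl : List String) (l : List String) : Int × Int :=
  let start_ent := (PySem.List.pyGet? sl 0).getD ""        -- sl[0]; Pre_ excludes the IndexError
  let end_ent := (PySem.List.pyGet? sl (-1)).getD ""       -- sl[-1]
  match fsli_loop start_ent end_ent 0 l (false, none, none) with
  | (_, some s, some e) => if s < e then (e, s) else (s, e)
  | _ => (0, 0)    -- Python raises TypeError comparing None here; excluded by Pre_

-- ===== PORT B =====
-- B's 'for i in range(len(l)-1, start-1, -1): if end_ent in l[i]: end = i; break':
-- k counts the remaining indices, current index is start + (k-1).
def fsli_scanBack (ee : String) (l : List String) (start : Nat) : Nat → Option Int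
  | 0 => none
  | k + 1 =>
      let i := start + k
      if PySem.Str.isIn ee ((PySem.List.pyGet? l (i : Int)).getD "") then some (i : Int)
      else fsli_scanBack ee l start k

def find_sub_list_inside_alt (sl : List String) (l : List String) : Int × Int :=
  let start_ent := (PySem.List.pyGet? sl 0).getD ""
  let end_ent := (PySem.List.pyGet? sl (-1)).getD ""
  match l.findIdx? (fun w => PySem.Str.isIn start_ent w) with   -- next((i for i,w in enumerate(l) if ...), None)
  | none => (0, 0)          -- start=None, end=None: Python raises TypeError on 'None < None'; excluded by Pre_
  | some s =>
      match fsli_scanBack end_ent l s (l.length - s) with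
      | none => (0, 0)      -- Python raises TypeError on 'int < None'; excluded by Pre_
      | some e => if (s : Int) < e then (e, (s : Int)) else ((s : Int), e)

-- ===== PRECONDITION & SPEC =====
-- Pre_ excludes exactly the crashes of A: sl = [] (IndexError on sl[0]) and the inputs where
-- start or end stays None, on which 'start < end' raises TypeError.
def Pre_find_sub_list_inside (sl : List String) (l : List String) : Prop :=
  sl ≠ [] ∧ ∃ i, i < l.length ∧ PySem.Str.isIn (sl.getD 0 "") (l.getD i "") = true ∧
    ∃ j, j < l.length ∧ i ≤ j ∧ PySem.Str.isIn (sl.getD (sl.length - 1) "") (l.getD j "") = true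
instance (sl : List String) (l : List String) : Decidable (Pre_find_sub_list_inside sl l) := by
  unfold Pre_find_sub_list_inside; infer_instance

def pvWitness_find_sub_list_inside : List String × List String := (["a", "b"], ["xa", "yb"])

def Spec_find_sub_list_inside (sl : List String) (l : List String) (out : Int × Int) : Prop := out = find_sub_list_inside_alt sl l
instance (sl : List String) (l : List String) (out : Int × Int) : Decidable (Spec_find_sub_list_inside sl l out) := by unfold Spec_find_sub_list_inside; infer_instance

-- ===== CLAIM (what is proved, stated in full; the proofs are below) =====
def Claim_equal_find_sub_list_inside : Prop := ∀ (sl : List String) (l : List String), Dom_find_sub_list_inside sl l → Pre_find_sub_list_inside sl l → Spec_find_sub_list_inside sl l (find_sub_list_inside sl l)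

-- ===== LEMMAS AND PROOFS =====

-- forward "last match" accumulator: what A's loop does to 'end' once found_start is set
def fslFwd (ee : String) : Nat → List String → Option Int → Option Int
  | _, [], e => e
  | i, w :: ws, e => fslFwd ee (i + 1) ws (if PySem.Str.isIn ee w then some (i : Int) else e)

theorem fsli_loop_found (se ee : String) : ∀ (ws : List String) (i : Nat) (s e : Option Int),
    fsli_loop se ee i ws (true, s, e) = (true, s, fslFwd ee i ws e) := by
  intro ws
  induction ws with
  | nil => intro i s e; rfl
  | cons w ws ih =>
      intro i s e
      by_cases h : PySem.Chars.isIn ee.toList w.toList = true <;>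
        simp [fsli_loop, fslFwd, h, ih]

theorem fsli_loop_phase1 (se ee : String) : ∀ (ws : List String) (i : Nat),
    fsli_loop se ee i ws (false, none, none) =
      match ws.findIdx? (fun w => PySem.Str.isIn se w) with
      | none => (false, none, none)
      | some k => (true, some ((i + k : Nat) : Int), fslFwd ee (i + k) (ws.drop k) none) := by
  intro ws
  induction ws with
  | nil => intro i; rfl
  | cons w ws ih =>
      intro i
      by_cases h : PySem.Chars.isIn se.toList w.toList = true
      · have step : fsli_loop se ee i (w :: ws) (false, none, none)
            = fsli_loop se ee (i + 1) ws
                (true, some (i : Int),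
                  if PySem.Chars.isIn ee.toList w.toList = true then some (i : Int) else none) := by
          by_cases hq : PySem.Chars.isIn ee.toList w.toList = true <;> simp [fsli_loop, h, hq]
        rw [step, fsli_loop_found]
        have hfw : fslFwd ee i (w :: ws) none
            = fslFwd ee (i + 1) ws
                (if PySem.Chars.isIn ee.toList w.toList = true then some (i : Int) else none) := by
          by_cases hq : PySem.Chars.isIn ee.toList w.toList = true <;> simp [fslFwd, hq]
        simp [List.findIdx?_cons, h, hfw]
      · have step : fsli_loop se ee i (w :: ws) (false, none, none)
            = fsli_loop se ee (i + 1) ws (false, none, none) := by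
          simp [fsli_loop, h]
        rw [step, ih]
        simp only [List.findIdx?_cons]
        rw [if_neg (by simpa using h)]
        cases hf : ws.findIdx? (fun w => PySem.Str.isIn se w) with
        | none => simp
        | some k =>
            simp only [Option.map_some]
            have h1 : i + 1 + k = i + (k + 1) := by omega
            simp [h1]

theorem fslFwd_append (ee : String) : ∀ (xs ys : List String) (i : Nat) (e : Option Int),
    fslFwd ee i (xs ++ ys) e = fslFwd ee (i + xs.length) ys (fslFwd ee i xs e) := by
  intro xs
  induction xs with
  | nil => intro ys i e; simp [fslFwd]
  | cons x xs ih =>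
      intro ys i e
      simp only [List.cons_append, fslFwd, ih]
      congr 1
      simp [List.length_cons]; omega

theorem fsli_scanBack_eq (ee : String) (l : List String) (s : Nat) :
    ∀ (k : Nat), s + k ≤ l.length →
      fsli_scanBack ee l s k = fslFwd ee s ((l.drop s).take k) none := by
  intro k
  induction k with
  | zero => intro _; rfl
  | succ k ih =>
      intro hk
      have hlt : s + k < l.length := by omega
      have hgd : (l.drop s)[k]? = some l[s + k] := by
        rw [List.getElem?_drop]
        exact List.getElem?_eq_getElem hlt
      have htake : (l.drop s).take (k + 1) = (l.drop s).take k ++ [l[s + k]] := by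
        rw [List.take_add_one, hgd]; rfl
      have hlen : ((l.drop s).take k).length = k := by
        simp [List.length_take, List.length_drop]; omega
      have hget : (PySem.List.pyGet? l ((s + k : Nat) : Int)).getD "" = l[s + k] := by
        rw [PySem.List.pyGet?_natCast, List.getElem?_eq_getElem hlt]; rfl
      rw [htake, fslFwd_append, hlen]
      simp only [fsli_scanBack]
      rw [hget]
      by_cases h : PySem.Chars.isIn ee.toList (l[s + k]).toList = true
      · simp [fslFwd, h]
      · simp [fslFwd, h, ih (by omega)]

theorem fsli_ports_eq (sl l : List String) :
    find_sub_list_inside sl l = find_sub_list_inside_alt sl l := by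
  show (match fsli_loop ((PySem.List.pyGet? sl 0).getD "") ((PySem.List.pyGet? sl (-1)).getD "") 0 l
          (false, none, none) with
        | (_, some s, some e) => if s < e then (e, s) else (s, e)
        | _ => ((0 : Int), (0 : Int)))
      = (match l.findIdx? (fun w => PySem.Str.isIn ((PySem.List.pyGet? sl 0).getD "") w) with
        | none => ((0 : Int), (0 : Int))
        | some s =>
          match fsli_scanBack ((PySem.List.pyGet? sl (-1)).getD "") l s (l.length - s) with
          | none => ((0 : Int), (0 : Int))
          | some e => if (s : Int) < e then (e, (s : Int)) else ((s : Int), e))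
  rw [fsli_loop_phase1]
  cases hf : l.findIdx? (fun w => PySem.Str.isIn ((PySem.List.pyGet? sl 0).getD "") w) with
  | none => rfl
  | some s =>
      have hs : s < l.length := (List.findIdx?_eq_some_iff_findIdx_eq.mp hf).1
      have hscan := fsli_scanBack_eq ((PySem.List.pyGet? sl (-1)).getD "") l s (l.length - s)
        (by omega)
      have htake : (l.drop s).take (l.length - s) = l.drop s := by
        apply List.take_of_length_le; simp
      rw [htake] at hscan
      simp only [hscan, Nat.zero_add]
      cases fslFwd ((PySem.List.pyGet? sl (-1)).getD "") s (l.drop s) none with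
      | none => rfl
      | some e => rfl

-- ===== VERDICT (by name: the statement is the Claim_ definition above) =====
theorem find_sub_list_inside_spec : Claim_equal_find_sub_list_inside := by
  intro sl l _ _
  unfold Spec_find_sub_list_inside
  exact fsli_ports_eq sl l
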